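-- pv_equiv track=rewrite | github.com/yulaomao/udp------ | decode_roi_records.py | fill_horizontal_gaps
-- ===== SOURCE A (Python) =====
-- HORIZONTAL_GAP = 2
--
-- def fill_horizontal_gaps(mask: list[list[int]], max_gap: int = HORIZONTAL_GAP) -> list[list[int]]:
--     height = len(mask)
--     width = len(mask[0]) if height else 0
--     output = [row[:] for row in mask]
--
--     for y in range(height):
--         active_columns = [x for x in range(width) if mask[y][x]]
--         for first_column, second_column in zip(active_columns, active_columns[1:]):
--             if 1 < second_column - first_column <= max_gap + 1:
--                 for x in range(first_column + 1, second_column):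
--                     output[y][x] = 1
--
--     return output
-- ===== SOURCE B (Python) =====
-- HORIZONTAL_GAP = 2
--
-- def fill_horizontal_gaps(mask: list[list[int]], max_gap: int = HORIZONTAL_GAP) -> list[list[int]]:
--     height = len(mask)
--     width = len(mask[0]) if height else 0
--     output = []
--     for row in mask:
--         # pass 1: distance from each column to the nearest set pixel at or to its left
--         left = []
--         d = None
--         for x in range(width):
--             if row[x]:
--                 d = 0
--             elif d is not None:
--                 d += 1
--             left.append(d)
--         # pass 2 (right-to-left): symmetric distance; a zero cell lies in a fillable
--         # gap iff left-distance + right-distance <= max_gap + 1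
--         out = list(row)
--         d = None
--         for x in range(width - 1, -1, -1):
--             if row[x]:
--                 d = 0
--             else:
--                 if d is not None:
--                     d += 1
--                 if d is not None and left[x] is not None and left[x] + d <= max_gap + 1:
--                     out[x] = 1
--         output.append(out)
--     return output
-- ===== Notes on version B (the rewrite author's own statement) =====
-- stated objective: alternative
-- what changed: Replaces A's build-active-column-list-and-zip-consecutive-pairs gap fill with a per-row two-pass distance transform: one forward sweep records each cell's distance to the nearest set pixel on its left, one backward sweep records the right distance and fills a zero cell exactly when the two distances sum to at most max_gap+1.
import Mathlib
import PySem

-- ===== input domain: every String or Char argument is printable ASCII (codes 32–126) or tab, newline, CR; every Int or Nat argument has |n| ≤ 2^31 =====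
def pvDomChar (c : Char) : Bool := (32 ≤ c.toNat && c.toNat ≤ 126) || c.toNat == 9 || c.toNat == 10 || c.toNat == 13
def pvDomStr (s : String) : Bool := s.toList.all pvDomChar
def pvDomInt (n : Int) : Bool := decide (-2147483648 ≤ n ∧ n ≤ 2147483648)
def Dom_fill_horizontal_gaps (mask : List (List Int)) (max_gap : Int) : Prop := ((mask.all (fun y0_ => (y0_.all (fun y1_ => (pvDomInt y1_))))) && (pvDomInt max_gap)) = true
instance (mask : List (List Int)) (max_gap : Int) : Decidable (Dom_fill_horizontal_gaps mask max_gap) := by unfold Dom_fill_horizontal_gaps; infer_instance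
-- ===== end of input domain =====

-- B replaces A's active-column list + consecutive-pair zip + inner fill loop by a per-row two-pass
-- distance transform (forward sweep: distance to nearest set pixel on the left; backward sweep:
-- right distance, filling a zero cell iff the two distances sum to ≤ max_gap+1) (objective: alternative).

-- ===== PORT A =====
-- output[y][x] = 1
def pvFillCell (y x : Nat) (out : List (List Int)) : List (List Int) :=
  out.set y ((out.getD y []).set x 1)

-- body of A's `for first_column, second_column in zip(...)` loop
def pvPairStepA (y : Nat) (max_gap : Int) (out : List (List Int)) (p : Nat × Nat) : List (List Int) :=
  if 1 < (p.2 : Int) - (p.1 : Int) ∧ (p.2 : Int) - (p.1 : Int) ≤ max_gap + 1 then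
    (List.range' (p.1 + 1) (p.2 - p.1 - 1)).foldl (fun o x => pvFillCell y x o) out
  else out

-- body of A's `for y in range(height)` loop
def pvRowLoopA (mask : List (List Int)) (width : Nat) (max_gap : Int)
    (out : List (List Int)) (y : Nat) : List (List Int) :=
  let active := (List.range width).filter (fun x => (mask.getD y []).getD x 0 != 0)
  (active.zip active.tail).foldl (pvPairStepA y max_gap) out

def fill_horizontal_gaps (mask : List (List Int)) (max_gap : Int) : List (List Int) :=
  let height := mask.length
  let width := if height ≠ 0 then (mask.headD []).length else 0
  let output := mask.map (fun row => row)
  (List.range height).foldl (pvRowLoopA mask width max_gap) output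

-- ===== PORT B =====
-- body of B's forward `for x in range(width)` loop; state = (left, d)
def pvLeftStep (row : List Int) (st : List (Option Nat) × Option Nat) (x : Nat) :
    List (Option Nat) × Option Nat :=
  let d := if row.getD x 0 != 0 then some 0 else st.2.map (· + 1)
  (st.1 ++ [d], d)

-- body of B's backward loop; state = (out, d); `range(width-1,-1,-1)` is the reversed range
def pvRightStep (row : List Int) (max_gap : Int) (left : List (Option Nat))
    (st : List Int × Option Nat) (x : Nat) : List Int × Option Nat :=
  if row.getD x 0 != 0 then (st.1, some 0)
  else
    let d := st.2.map (· + 1)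
    let out :=
      match d, left.getD x none with
      | some dv, some lv => if (lv : Int) + (dv : Int) ≤ max_gap + 1 then st.1.set x 1 else st.1
      | _, _ => st.1
    (out, d)

-- one row of B: forward distance pass, then backward pass filling as it goes
def pvRowB (row : List Int) (width : Nat) (max_gap : Int) : List Int :=
  let left := ((List.range width).foldl (pvLeftStep row) ([], none)).1
  (((List.range width).reverse).foldl (pvRightStep row max_gap left) (row, none)).1

def fill_horizontal_gaps_alt (mask : List (List Int)) (max_gap : Int) : List (List Int) :=
  let height := mask.length
  let width := if height ≠ 0 then (mask.headD []).length else 0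
  mask.map (fun row => pvRowB row width max_gap)

-- ===== PRECONDITION & SPEC =====
-- A raises IndexError (mask[y][x]) exactly when some row is shorter than len(mask[0]); those inputs
-- are excluded (B raises there too).
def Pre_fill_horizontal_gaps (mask : List (List Int)) (max_gap : Int) : Prop :=
  ∀ row ∈ mask, (mask.headD []).length ≤ row.length
instance (mask : List (List Int)) (max_gap : Int) : Decidable (Pre_fill_horizontal_gaps mask max_gap) := by unfold Pre_fill_horizontal_gaps; infer_instance

def pvWitness_fill_horizontal_gaps : List (List Int) × Int := ([[1, 0, 0, 1], [0, 1, 0, 0]], 2)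

def Spec_fill_horizontal_gaps (mask : List (List Int)) (max_gap : Int) (out : List (List Int)) : Prop := out = fill_horizontal_gaps_alt mask max_gap
instance (mask : List (List Int)) (max_gap : Int) (out : List (List Int)) : Decidable (Spec_fill_horizontal_gaps mask max_gap out) := by unfold Spec_fill_horizontal_gaps; infer_instance

-- ===== CLAIM (what is proved, stated in full; the proofs are below) =====
def Claim_equal_fill_horizontal_gaps : Prop := ∀ (mask : List (List Int)) (max_gap : Int), Dom_fill_horizontal_gaps mask max_gap → Pre_fill_horizontal_gaps mask max_gap → Spec_fill_horizontal_gaps mask max_gap (fill_horizontal_gaps mask max_gap)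

-- ===== LEMMAS AND PROOFS =====

-- A's pair step acting on a single row (proof-side view of pvPairStepA)
def pvStepArow (max_gap : Int) (r : List Int) (p : Nat × Nat) : List Int :=
  if 1 < (p.2 : Int) - (p.1 : Int) ∧ (p.2 : Int) - (p.1 : Int) ≤ max_gap + 1 then
    (List.range' (p.1 + 1) (p.2 - p.1 - 1)).foldl (fun r x => r.set x 1) r
  else r

-- A's effect on one row, as a row function
def pvRowA (row : List Int) (width : Nat) (max_gap : Int) : List Int :=
  let active := (List.range width).filter (fun x => row.getD x 0 != 0)
  (active.zip active.tail).foldl (pvStepArow max_gap) row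

-- truthiness of a cell
def pvSet (row : List Int) (x : Nat) : Bool := row.getD x 0 != 0

-- distance to nearest set pixel at or left of n (the forward pass's d after processing n)
def pvLv (row : List Int) : Nat → Option Nat
  | 0 => if pvSet row 0 then some 0 else none
  | n+1 => if pvSet row (n+1) then some 0 else (pvLv row n).map (· + 1)

-- the forward pass's d entering index n
def pvLvPre (row : List Int) : Nat → Option Nat
  | 0 => none
  | n+1 => pvLv row n

-- distance to nearest set pixel in [n, n+f)
def pvRdAux (row : List Int) : Nat → Nat → Option Nat
  | 0, _ => none
  | f+1, n => if pvSet row n then some 0 else (pvRdAux row f (n+1)).map (· + 1)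

-- distance to nearest set pixel in [n, w)
def pvRv (row : List Int) (w n : Nat) : Option Nat := pvRdAux row (w - n) n

-- B fills cell x
def pvFillB (row : List Int) (w : Nat) (mg : Int) (x : Nat) : Bool :=
  !pvSet row x &&
    (match pvLv row x, pvRv row w x with
     | some a, some b => decide ((a : Int) + (b : Int) ≤ mg + 1)
     | _, _ => false)

-- A fills cell x via pair p
def pvCondA (mg : Int) (x : Nat) (p : Nat × Nat) : Bool :=
  decide ((1 < (p.2 : Int) - (p.1 : Int) ∧ (p.2 : Int) - (p.1 : Int) ≤ mg + 1) ∧ p.1 < x ∧ x < p.2)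

theorem pv_outerA_foldl_set_row {β : Type} (y : Nat) (g : List Int → β → List Int)
    (l : List β) (out : List (List Int)) (hy : y < out.length) :
    l.foldl (fun o e => o.set y (g (o.getD y []) e)) out
      = out.set y (l.foldl g (out.getD y [])) := by
  induction l generalizing out with
  | nil => simp [List.getElem?_eq_getElem hy, List.set_getElem_self]
  | cons e t ih =>
      simp only [List.foldl_cons]
      rw [ih _ (by simpa using hy)]
      simp [List.set_set, List.getD, List.getElem?_set_self (by simpa using hy)]

theorem pvPairStepA_eq (y : Nat) (max_gap : Int) (out : List (List Int)) (p : Nat × Nat)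
    (hy : y < out.length) :
    pvPairStepA y max_gap out p = out.set y (pvStepArow max_gap (out.getD y []) p) := by
  unfold pvPairStepA pvStepArow
  split
  · simp only [pvFillCell]
    exact pv_outerA_foldl_set_row y (fun r x => r.set x 1) (List.range' (p.1 + 1) (p.2 - p.1 - 1)) out hy
  · rw [List.getD_eq_getElem _ _ hy, List.set_getElem_self]

theorem pv_pairfold_set (y : Nat) (max_gap : Int) (pairs : List (Nat × Nat))
    (out : List (List Int)) (hy : y < out.length) :
    pairs.foldl (pvPairStepA y max_gap) out
      = out.set y (pairs.foldl (pvStepArow max_gap) (out.getD y [])) := by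
  induction pairs generalizing out with
  | nil =>
      rw [List.foldl_nil, List.foldl_nil, List.getD_eq_getElem _ _ hy, List.set_getElem_self]
  | cons p t ih =>
      rw [List.foldl_cons, List.foldl_cons, pvPairStepA_eq y max_gap out p hy,
        ih _ (by simpa using hy)]
      simp [List.set_set, List.getD, List.getElem?_set_self (by simpa using hy)]

theorem pv_outerA (mask : List (List Int)) (width : Nat) (max_gap : Int) :
    ∀ n, n ≤ mask.length →
      (List.range n).foldl (pvRowLoopA mask width max_gap) mask
        = (mask.take n).map (fun row => pvRowA row width max_gap) ++ mask.drop n := by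
  intro n
  induction n with
  | zero => simp
  | succ n ih =>
      intro hn
      have hn' : n < mask.length := hn
      rw [List.range_succ, List.foldl_append, List.foldl_cons, List.foldl_nil,
        ih (Nat.le_of_lt hn')]
      set pre := (mask.take n).map (fun row => pvRowA row width max_gap) with hpre
      have hlen : pre.length = n := by simp [hpre, Nat.le_of_lt hn']
      have hdrop : mask.drop n = mask[n] :: mask.drop (n + 1) := List.drop_eq_getElem_cons hn'
      have hlt : n < (pre ++ mask.drop n).length := by simp [hlen, hn']
      have hget : (pre ++ mask.drop n).getD n [] = mask[n] := by
        rw [List.getD_append_right _ _ _ _ (by omega), hdrop]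
        simp [hlen, List.getElem?_eq_getElem hn']
      have hgetm : mask.getD n [] = mask[n] := List.getD_eq_getElem _ _ hn'
      have hfold : pvRowLoopA mask width max_gap (pre ++ mask.drop n) n
          = (pre ++ mask.drop n).set n (pvRowA mask[n] width max_gap) := by
        unfold pvRowLoopA
        simp only [hgetm]
        rw [pv_pairfold_set _ _ _ _ hlt, hget]
        rfl
      rw [hfold]
      have hset : ∀ (r : List Int), (pre ++ mask.drop n).set n r
          = pre ++ r :: mask.drop (n + 1) := by
        intro r
        rw [List.set_append_right _ _ (by omega)]
        simp only [hlen, Nat.sub_self]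
        rw [hdrop, List.set_cons_zero]
      rw [hset, List.take_succ_eq_append_getElem hn', List.map_append, hpre]
      simp

theorem pv_foldl_set_length (l : List Nat) (r : List Int) :
    (l.foldl (fun s x => s.set x 1) r).length = r.length := by
  induction l generalizing r with
  | nil => rfl
  | cons x t ih => simp [ih]

theorem pv_stepArow_length (max_gap : Int) (r : List Int) (p : Nat × Nat) :
    (pvStepArow max_gap r p).length = r.length := by
  unfold pvStepArow
  split
  · exact pv_foldl_set_length _ _
  · rfl

-- the value of an iterated set-to-1
theorem pv_foldl_set_get : ∀ (l : List Nat) (r : List Int) (x : Nat),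
    (l.foldl (fun s i => s.set i 1) r)[x]? = if x ∈ l ∧ x < r.length then some 1 else r[x]? := by
  intro l
  induction l with
  | nil => intro r x; simp
  | cons i t ih =>
      intro r x
      rw [List.foldl_cons, ih]
      rw [List.length_set]
      by_cases hxt : x ∈ t ∧ x < r.length
      · rw [if_pos hxt, if_pos ⟨List.mem_cons_of_mem _ hxt.1, hxt.2⟩]
      · rw [if_neg hxt]
        by_cases hxi : x = i ∧ x < r.length
        · obtain ⟨hxe, hxl⟩ := hxi
          subst hxe
          rw [if_pos ⟨List.mem_cons_self, hxl⟩]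
          rw [List.getElem?_set_self hxl]
        · have : ¬ (x ∈ i :: t ∧ x < r.length) := by
            intro ⟨h1, h2⟩
            rcases List.mem_cons.mp h1 with h | h
            · exact hxi ⟨h, h2⟩
            · exact hxt ⟨h, h2⟩
          rw [if_neg this]
          by_cases hx : x = i
          · subst hx
            have : ¬ x < r.length := fun h => hxi ⟨rfl, h⟩
            simp [this]
          · rw [List.getElem?_set_ne (fun h => hx h.symm)]

theorem pv_stepA_get (mg : Int) (r : List Int) (p : Nat × Nat) (h : p.2 ≤ r.length) (x : Nat) :
    (pvStepArow mg r p)[x]? = if pvCondA mg x p = true then some 1 else r[x]? := by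
  unfold pvStepArow pvCondA
  by_cases hc : 1 < (p.2 : Int) - (p.1 : Int) ∧ (p.2 : Int) - (p.1 : Int) ≤ mg + 1
  · rw [if_pos hc, pv_foldl_set_get]
    have hlt : p.1 + 1 < p.2 := by omega
    by_cases hx : p.1 < x ∧ x < p.2
    · rw [if_pos ⟨by rw [List.mem_range'_1]; omega, by omega⟩,
        if_pos (by simp only [decide_eq_true_eq]; exact ⟨hc, hx⟩)]
    · rw [if_neg (by rw [List.mem_range'_1]; intro ⟨h1, _⟩; exact hx ⟨by omega, by omega⟩),
        if_neg (by simp only [decide_eq_true_eq]; intro ⟨_, h2⟩; exact hx h2)]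
  · rw [if_neg hc, if_neg (by simp only [decide_eq_true_eq]; intro ⟨h1, _⟩; exact hc h1)]

theorem pv_foldPairs_get (mg : Int) (N : Nat) : ∀ (P : List (Nat × Nat)) (r : List Int),
    r.length = N → (∀ p ∈ P, p.2 ≤ N) → ∀ x,
    (P.foldl (pvStepArow mg) r)[x]? = if P.any (pvCondA mg x) = true then some 1 else r[x]? := by
  intro P
  induction P with
  | nil => intro r _ _ x; simp
  | cons p t ih =>
      intro r hr hb x
      rw [List.foldl_cons,
        ih _ (by rw [pv_stepArow_length]; exact hr) (fun q hq => hb q (List.mem_cons_of_mem _ hq)) x,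
        pv_stepA_get mg r p (hr ▸ hb p (List.mem_cons_self)) x]
      by_cases h1 : t.any (pvCondA mg x) = true
      · simp [List.any_cons, h1]
      · by_cases h2 : pvCondA mg x p = true <;> simp [List.any_cons, h1, h2]

-- forward pass computes pvLv
theorem pv_lv_step (row : List Int) (n : Nat) :
    pvLv row n = if pvSet row n then some 0 else (pvLvPre row n).map (· + 1) := by
  cases n with
  | zero => simp only [pvLv, pvLvPre, Option.map_none]
  | succ k => simp only [pvLv, pvLvPre]

theorem pv_forward (row : List Int) (n : Nat) :
    (List.range n).foldl (pvLeftStep row) ([], none)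
      = ((List.range n).map (pvLv row), pvLvPre row n) := by
  induction n with
  | zero => rfl
  | succ k ih =>
      rw [List.range_succ, List.foldl_append, ih, List.foldl_cons, List.foldl_nil]
      unfold pvLeftStep
      have hd : (if row.getD k 0 != 0 then some 0 else (pvLvPre row k).map (· + 1)) = pvLv row k :=
        (pv_lv_step row k).symm
      simp only [hd, List.map_append, List.map_cons, List.map_nil]
      rfl

theorem pv_rv_none (row : List Int) (w n : Nat) (h : w ≤ n) : pvRv row w n = none := by
  unfold pvRv
  rw [Nat.sub_eq_zero_of_le h]
  rfl

theorem pv_rv_unfold (row : List Int) (w n : Nat) (h : n < w) :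
    pvRv row w n = if pvSet row n then some 0 else (pvRv row w (n+1)).map (· + 1) := by
  unfold pvRv
  have : w - n = (w - (n + 1)) + 1 := by omega
  rw [this]
  rfl

theorem pv_rd_spec (row : List Int) : ∀ (f n b : Nat),
    pvRdAux row f n = some b ↔
      (b < f ∧ pvSet row (n + b) = true ∧ ∀ j, j < b → pvSet row (n + j) = false) := by
  intro f
  induction f with
  | zero =>
      intro n b
      simp only [pvRdAux]
      constructor
      · intro h; cases h
      · intro ⟨h, _, _⟩; omega
  | succ f ih =>
      intro n b
      simp only [pvRdAux]
      by_cases hs : pvSet row n = true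
      · rw [if_pos hs]
        constructor
        · intro h
          have hb : b = 0 := by injection h; omega
          subst hb
          exact ⟨by omega, by simpa using hs, by omega⟩
        · intro ⟨_, _, hall⟩
          by_cases hb : b = 0
          · subst hb; rfl
          · exact absurd hs (by simpa using hall 0 (by omega))
      · rw [if_neg hs]
        constructor
        · intro h
          rcases Option.map_eq_some_iff.mp h with ⟨b', hb', hbb⟩
          rcases (ih (n+1) b').mp hb' with ⟨h1, h2, h3⟩
          have he : n + b = n + 1 + b' := by omega
          refine ⟨by omega, he ▸ h2, ?_⟩
          intro j hj
          by_cases hj0 : j = 0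
          · subst hj0; simpa using hs
          · have hjj : n + j = n + 1 + (j - 1) := by omega
            rw [hjj]; exact h3 (j - 1) (by omega)
        · intro ⟨h1, h2, h3⟩
          have hb0 : b ≠ 0 := by
            intro h; subst h; exact hs (by simpa using h2)
          have hmain : pvRdAux row f (n+1) = some (b - 1) := by
            have he : n + 1 + (b - 1) = n + b := by omega
            refine (ih (n+1) (b-1)).mpr ⟨by omega, he ▸ h2, ?_⟩
            intro j hj
            have hjj : n + 1 + j = n + (j + 1) := by omega
            rw [hjj]; exact h3 (j + 1) (by omega)
          rw [hmain]
          simp only [Option.map_some]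
          congr 1
          omega

theorem pv_rv_spec (row : List Int) (w n b : Nat) :
    pvRv row w n = some b ↔
      (n + b < w ∧ pvSet row (n + b) = true ∧ ∀ j, j < b → pvSet row (n + j) = false) := by
  unfold pvRv
  rw [pv_rd_spec]
  constructor
  · intro ⟨h1, h2, h3⟩; exact ⟨by omega, h2, h3⟩
  · intro ⟨h1, h2, h3⟩; exact ⟨by omega, h2, h3⟩

theorem pv_lv_spec (row : List Int) : ∀ (n a : Nat),
    pvLv row n = some a ↔
      (a ≤ n ∧ pvSet row (n - a) = true ∧ ∀ z, n - a < z → z ≤ n → pvSet row z = false) := by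
  intro n
  induction n with
  | zero =>
      intro a
      simp only [pvLv]
      by_cases hs : pvSet row 0 = true
      · rw [if_pos hs]
        constructor
        · intro h
          have : a = 0 := by injection h; omega
          subst this
          exact ⟨le_refl _, hs, by omega⟩
        · intro ⟨h1, _, _⟩
          have : a = 0 := by omega
          subst this; rfl
      · rw [if_neg hs]
        constructor
        · intro h; cases h
        · intro ⟨h1, h2, _⟩
          have : a = 0 := by omega
          subst this
          exact absurd h2 hs
  | succ n ih =>
      intro a
      simp only [pvLv]
      by_cases hs : pvSet row (n+1) = true
      · rw [if_pos hs]
        constructor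
        · intro h
          have : a = 0 := by injection h; omega
          subst this
          exact ⟨by omega, by simpa using hs, by omega⟩
        · intro ⟨h1, h2, h3⟩
          by_cases ha : a = 0
          · subst ha; rfl
          · exact absurd hs (by simpa using h3 (n+1) (by omega) (le_refl _))
      · rw [if_neg hs]
        constructor
        · intro h
          rcases Option.map_eq_some_iff.mp h with ⟨a', ha', haa⟩
          rcases (ih a').mp ha' with ⟨h1, h2, h3⟩
          have he : n + 1 - a = n - a' := by omega
          refine ⟨by omega, he ▸ h2, ?_⟩
          intro z hz1 hz2
          by_cases hz : z = n + 1
          · subst hz; simpa using hs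
          · exact h3 z (by omega) (by omega)
        · intro ⟨h1, h2, h3⟩
          have ha0 : a ≠ 0 := by
            intro h; subst h
            exact hs (by simpa using h2)
          have hmain : pvLv row n = some (a - 1) := by
            have he : n - (a - 1) = n + 1 - a := by omega
            refine (ih (a-1)).mpr ⟨by omega, he ▸ h2, ?_⟩
            intro z hz1 hz2
            exact h3 z (by omega) (by omega)
          rw [hmain]
          simp only [Option.map_some]
          congr 1
          omega

-- the backward pass, pointwise
theorem pv_bfold (row : List Int) (w : Nat) (mg : Int) (hw : w ≤ row.length) :
    ∀ n, n ≤ w → ∀ r : List Int, r.length = row.length → ∀ x : Nat,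
    (((List.range n).reverse.foldl (pvRightStep row mg ((List.range w).map (pvLv row))) (r, pvRv row w n)).1)[x]?
      = if x < n ∧ pvFillB row w mg x = true then some 1 else r[x]? := by
  intro n
  induction n with
  | zero =>
      intro _ r _ x
      simp
  | succ n ih =>
      intro hn r hr x
      have hnw : n < w := hn
      have hrange : (List.range (n+1)).reverse = n :: (List.range n).reverse := by
        rw [List.range_succ]; simp
      rw [hrange, List.foldl_cons]
      have hleft : ((List.range w).map (pvLv row)).getD n none = pvLv row n := by
        rw [List.getD_eq_getElem?_getD, List.getElem?_map, List.getElem?_range hnw]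
        rfl
      have hstep : pvRightStep row mg ((List.range w).map (pvLv row)) (r, pvRv row w (n+1)) n
          = ((if pvFillB row w mg n = true then r.set n 1 else r), pvRv row w n) := by
        unfold pvRightStep
        by_cases hs : pvSet row n = true
        · rw [if_pos (by simpa [pvSet] using hs)]
          rw [pv_rv_unfold row w n hnw, if_pos hs]
          have : pvFillB row w mg n = false := by simp [pvFillB, hs]
          rw [this]
          simp
        · rw [if_neg (by simpa [pvSet] using hs)]
          have hsf : pvSet row n = false := by simpa using hs
          have hd : (pvRv row w (n+1)).map (· + 1) = pvRv row w n := by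
            rw [pv_rv_unfold row w n hnw, if_neg hs]
          dsimp only
          rw [hd, hleft]
          have hfill : pvFillB row w mg n
              = (match pvLv row n, pvRv row w n with
                 | some a, some b => decide ((a : Int) + (b : Int) ≤ mg + 1)
                 | _, _ => false) := by
            simp [pvFillB, hsf]
          cases hrv : pvRv row w n with
          | none => cases hlv : pvLv row n <;> simp [hfill, hlv, hrv]
          | some b =>
              cases hlv : pvLv row n with
              | none => simp [hfill, hlv, hrv]
              | some a =>
                  simp only [hfill, hlv, hrv]
                  by_cases hle : (a : Int) + (b : Int) ≤ mg + 1
                  · simp [hle]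
                  · simp [hle]
      rw [hstep]
      have hr' : (if pvFillB row w mg n = true then r.set n 1 else r).length = row.length := by
        split <;> simp [hr]
      rw [ih (by omega) _ hr' x]
      by_cases hx1 : x < n ∧ pvFillB row w mg x = true
      · rw [if_pos hx1, if_pos ⟨by omega, hx1.2⟩]
      · rw [if_neg hx1]
        by_cases hxn : x = n
        · subst hxn
          by_cases hf : pvFillB row w mg x = true
          · rw [if_pos hf]
            have hxr : x < r.length := by omega
            rw [List.getElem?_set_self hxr,
              if_pos (show x < x + 1 ∧ pvFillB row w mg x = true from ⟨by omega, hf⟩)]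
          · rw [if_neg hf, if_neg (show ¬ (x < x + 1 ∧ pvFillB row w mg x = true) from
              fun h => hf h.2)]
        · have : ¬ (x < n + 1 ∧ pvFillB row w mg x = true) := by
            intro ⟨h1, h2⟩
            exact hx1 ⟨by omega, h2⟩
          rw [if_neg this]
          split
          · rw [List.getElem?_set_ne (fun h => hxn h.symm)]
          · rfl

-- consecutive pairs of a strictly sorted list
theorem pv_mem_zip_tail : ∀ (A : List Nat), A.Pairwise (· < ·) → ∀ (L R : Nat),
    ((L, R) ∈ A.zip A.tail ↔
      (L ∈ A ∧ R ∈ A ∧ L < R ∧ ∀ z ∈ A, z ≤ L ∨ R ≤ z)) := by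
  intro A
  induction A with
  | nil => intro _ L R; simp
  | cons a t ih =>
      intro hp L R
      have hpt : t.Pairwise (· < ·) := hp.tail
      have halt : ∀ z ∈ t, a < z := fun z hz => List.rel_of_pairwise_cons hp hz
      cases t with
      | nil =>
          constructor
          · intro h; simp at h
          · intro ⟨h1, h2, h3, _⟩
            simp only [List.mem_singleton] at h1 h2
            omega
      | cons b t' =>
          have hzip : (a :: b :: t').zip (a :: b :: t').tail
              = (a, b) :: ((b :: t').zip (b :: t').tail) := rfl
          rw [hzip]
          constructor
          · intro h
            rcases List.mem_cons.mp h with h | h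
            · have h1 : L = a := congrArg Prod.fst h
              have h2 : R = b := congrArg Prod.snd h
              refine ⟨by rw [h1]; exact List.mem_cons_self,
                by rw [h2]; exact List.mem_cons_of_mem _ List.mem_cons_self,
                by have := halt b List.mem_cons_self; omega, ?_⟩
              intro z hz
              rcases List.mem_cons.mp hz with rfl | hz'
              · left; omega
              · rcases List.mem_cons.mp hz' with rfl | hz''
                · right; omega
                · right
                  have := List.rel_of_pairwise_cons hpt hz''
                  omega
            · have h' := (ih hpt L R).mp h
              refine ⟨List.mem_cons_of_mem _ h'.1, List.mem_cons_of_mem _ h'.2.1,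
                h'.2.2.1, ?_⟩
              intro z hz
              rcases List.mem_cons.mp hz with rfl | hz'
              · left; exact le_of_lt (halt L h'.1)
              · exact h'.2.2.2 z hz'
          · intro ⟨hL, hR, hLR, hgap⟩
            rcases List.mem_cons.mp hL with hLa | hLt
            · have hRt : R ∈ b :: t' := by
                rcases List.mem_cons.mp hR with h | h
                · exact absurd hLR (by omega)
                · exact h
              have hRb : R = b := by
                rcases List.mem_cons.mp hRt with h | h
                · exact h
                · have hbR : b < R := List.rel_of_pairwise_cons hpt h
                  have hab : a < b := halt b List.mem_cons_self
                  rcases hgap b (List.mem_cons_of_mem _ List.mem_cons_self) with h1 | h1 <;>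
                    omega
              exact List.mem_cons.mpr (Or.inl (by rw [hLa, hRb]))
            · have hRt : R ∈ b :: t' := by
                rcases List.mem_cons.mp hR with h | h
                · have := halt L hLt
                  exact absurd hLR (by omega)
                · exact h
              exact List.mem_cons.mpr (Or.inr ((ih hpt L R).mpr
                ⟨hLt, hRt, hLR, fun z hz => hgap z (List.mem_cons_of_mem _ hz)⟩))

-- membership in the active-column list
theorem pv_mem_active (row : List Int) (w : Nat) (z : Nat) :
    z ∈ (List.range w).filter (fun i => row.getD i 0 != 0) ↔ (z < w ∧ pvSet row z = true) := by
  simp [List.mem_filter, List.mem_range, pvSet]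

-- the crux: A's pair condition at x  ↔  B's distance condition at x
theorem pv_fill_iff (row : List Int) (w : Nat) (mg : Int) (x : Nat) :
    (((List.range w).filter (fun i => row.getD i 0 != 0)).zip
        ((List.range w).filter (fun i => row.getD i 0 != 0)).tail).any (pvCondA mg x) = true ↔
      (x < w ∧ pvFillB row w mg x = true) := by
  set A := (List.range w).filter (fun i => row.getD i 0 != 0) with hA
  have hpA : A.Pairwise (· < ·) :=
    List.Pairwise.sublist List.filter_sublist List.pairwise_lt_range
  rw [List.any_eq_true]
  constructor
  · intro ⟨p, hp, hc⟩
    obtain ⟨L, R⟩ := p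
    simp only [pvCondA, decide_eq_true_eq] at hc
    obtain ⟨⟨hc1, hc2⟩, hLx, hxR⟩ := hc
    have hz := (pv_mem_zip_tail A hpA L R).mp hp
    obtain ⟨hLA, hRA, hLR, hgap⟩ := hz
    have hLw := (pv_mem_active row w L).mp hLA
    have hRw := (pv_mem_active row w R).mp hRA
    have hxw : x < w := by omega
    refine ⟨hxw, ?_⟩
    have hsx : pvSet row x = false := by
      by_contra h
      have : x ∈ A := (pv_mem_active row w x).mpr ⟨hxw, by simpa using h⟩
      rcases hgap x this with h | h <;> omega
    have hlv : pvLv row x = some (x - L) := by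
      rw [pv_lv_spec]
      have hLL : x - (x - L) = L := by omega
      refine ⟨by omega, by rw [hLL]; exact hLw.2, ?_⟩
      intro z hz1 hz2
      by_contra h
      have hzA : z ∈ A := (pv_mem_active row w z).mpr ⟨by omega, by simpa using h⟩
      rcases hgap z hzA with h' | h' <;> omega
    have hrv : pvRv row w x = some (R - x) := by
      rw [pv_rv_spec]
      have hRR : x + (R - x) = R := by omega
      refine ⟨by omega, by rw [hRR]; exact hRw.2, ?_⟩
      intro j hj
      by_contra h
      have hzA : x + j ∈ A := (pv_mem_active row w (x + j)).mpr ⟨by omega, by simpa using h⟩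
      rcases hgap (x + j) hzA with h' | h' <;> omega
    simp only [pvFillB, hsx, hlv, hrv, Bool.not_false, Bool.true_and]
    simp only [decide_eq_true_eq]
    omega
  · intro ⟨hxw, hf⟩
    simp only [pvFillB, Bool.and_eq_true, Bool.not_eq_true'] at hf
    obtain ⟨hsx, hm⟩ := hf
    rcases hlv : pvLv row x with _ | a
    · rw [hlv] at hm; cases hrvv : pvRv row w x <;> rw [hrvv] at hm <;> simp at hm
    rcases hrv : pvRv row w x with _ | b
    · rw [hlv, hrv] at hm; simp at hm
    rw [hlv, hrv] at hm
    simp only [decide_eq_true_eq] at hm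
    rcases (pv_lv_spec row x a).mp hlv with ⟨ha1, ha2, ha3⟩
    rcases (pv_rv_spec row w x b).mp hrv with ⟨hb1, hb2, hb3⟩
    have ha0 : a ≠ 0 := by
      intro h; subst h
      simp only [Nat.sub_zero] at ha2
      rw [ha2] at hsx; cases hsx
    have hb0 : b ≠ 0 := by
      intro h; subst h
      simp only [Nat.add_zero] at hb2
      rw [hb2] at hsx; cases hsx
    refine ⟨(x - a, x + b), ?_, ?_⟩
    · rw [pv_mem_zip_tail A hpA]
      refine ⟨(pv_mem_active row w (x - a)).mpr ⟨by omega, ha2⟩,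
        (pv_mem_active row w (x + b)).mpr ⟨by omega, hb2⟩, by omega, ?_⟩
      intro z hzA
      have hz := (pv_mem_active row w z).mp hzA
      by_contra h
      push_neg at h
      obtain ⟨h1, h2⟩ := h
      by_cases hzx : z ≤ x
      · by_cases hzz : z = x
        · subst hzz; rw [hz.2] at hsx; cases hsx
        · have := ha3 z (by omega) (by omega)
          rw [hz.2] at this; cases this
      · have := hb3 (z - x) (by omega)
        have hzx' : x + (z - x) = z := by omega
        rw [hzx'] at this
        rw [hz.2] at this; cases this
    · simp only [pvCondA, decide_eq_true_eq]
      refine ⟨⟨by omega, by omega⟩, by omega, by omega⟩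

-- one row: A's pair fill equals B's distance-transform fill
theorem pv_rowA_eq_rowB (row : List Int) (w : Nat) (mg : Int) (hw : w ≤ row.length) :
    pvRowA row w mg = pvRowB row w mg := by
  apply List.ext_getElem?
  intro x
  unfold pvRowA pvRowB
  rw [pv_forward row w]
  have hinit : pvRv row w w = none := pv_rv_none row w w (le_refl _)
  rw [show ((row, (none : Option Nat))) = (row, pvRv row w w) by rw [hinit]]
  rw [pv_bfold row w mg hw w (le_refl _) row rfl x]
  have hbound : ∀ p ∈ (((List.range w).filter (fun i => row.getD i 0 != 0)).zip
      ((List.range w).filter (fun i => row.getD i 0 != 0)).tail), p.2 ≤ row.length := by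
    intro p hp
    have h2 := (List.of_mem_zip hp).2
    have h3 := List.mem_of_mem_tail h2
    have := (pv_mem_active row w p.2).mp h3
    omega
  rw [pv_foldPairs_get mg row.length _ row rfl hbound x]
  exact if_congr (pv_fill_iff row w mg x) rfl rfl

-- ===== VERDICT (by name: the statement is the Claim_ definition above) =====
theorem fill_horizontal_gaps_spec : Claim_equal_fill_horizontal_gaps := by
  intro mask max_gap _ hpre
  unfold Spec_fill_horizontal_gaps fill_horizontal_gaps fill_horizontal_gaps_alt
  simp only []
  rw [List.map_id']
  rw [pv_outerA mask _ max_gap mask.length (le_refl _)]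
  rw [List.take_length, List.drop_length, List.append_nil]
  refine List.map_congr_left ?_
  intro row hrow
  refine pv_rowA_eq_rowB row _ max_gap ?_
  by_cases h : mask.length ≠ 0
  · simpa [h] using hpre row hrow
  · simp at h
    subst h
    simp at hrow
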